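-- pv_equiv track=rewrite | github.com/jonnyell89/sudoku_app | app/validator.py | is_unit_valid
-- ===== SOURCE A (Python) =====
-- from typing import List, Tuple, Iterable, Callable
--
-- def is_unit_valid(unit: List[int]) -> bool:
--
--     """
--     Checks if a row, column or subgrid contains unique numbers only.
--
--     Parameters:
--
--         unit (List[int]): A list of integers representing a row, column or subgrid.
--
--     Returns:
--
--         bool: True if the unit is valid, otherwise False.
--
--     """
--
--     nums = set()
--
--     for num in unit:
--
--         if num > 0:
--
--             if num in nums:
--
--                 return False
--
--             nums.add(num)
--
--     return True
-- ===== SOURCE B (Python) =====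
-- def is_unit_valid(unit):
--     s = sorted(n for n in unit if n > 0)
--     return all(a != b for a, b in zip(s, s[1:]))
-- ===== Notes on version B (the rewrite author's own statement) =====
-- stated objective: alternative
-- what changed: Replaces the incremental seen-set membership loop with a sort of the positive entries followed by a single adjacent-pairs scan for duplicates.
import Mathlib
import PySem

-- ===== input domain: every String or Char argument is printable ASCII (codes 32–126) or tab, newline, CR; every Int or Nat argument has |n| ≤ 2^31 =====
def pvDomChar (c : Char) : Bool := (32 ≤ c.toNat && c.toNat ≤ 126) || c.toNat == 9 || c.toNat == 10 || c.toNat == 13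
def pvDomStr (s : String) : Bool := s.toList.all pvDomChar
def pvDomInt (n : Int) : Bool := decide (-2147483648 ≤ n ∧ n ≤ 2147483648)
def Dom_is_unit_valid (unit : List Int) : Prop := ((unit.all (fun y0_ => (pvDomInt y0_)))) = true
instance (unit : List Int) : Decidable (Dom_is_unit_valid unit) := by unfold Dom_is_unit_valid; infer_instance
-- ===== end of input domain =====

-- B replaces A's incremental seen-set loop by sorting the positive entries and scanning adjacent pairs (alternative algorithm, same behaviour).

-- ===== PORT A =====
-- the for-loop with early 'return False', state = the 'nums' set
def isUnitValidGo (xs : List Int) (nums : PySem.Set Int) : Bool :=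
  match xs with
  | [] => true
  | num :: rest =>
    if num > 0 then
      if PySem.Set.contains nums num then false
      else isUnitValidGo rest (PySem.Set.add nums num)
    else isUnitValidGo rest nums

def is_unit_valid (unit : List Int) : Bool :=
  isUnitValidGo unit PySem.Set.empty

-- ===== PORT B =====
def is_unit_valid_alt (unit : List Int) : Bool :=
  let s := PySem.List.sorted (unit.filter (fun n => decide (n > 0))) (fun x => x) false
  (s.zip s.tail).all (fun p => p.1 != p.2)

-- ===== PRECONDITION & SPEC =====
def Spec_is_unit_valid (unit : List Int) (out : Bool) : Prop := out = is_unit_valid_alt unit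
instance (unit : List Int) (out : Bool) : Decidable (Spec_is_unit_valid unit out) := by unfold Spec_is_unit_valid; infer_instance

-- ===== CLAIM (what is proved, stated in full; the proofs are below) =====
def Claim_equal_is_unit_valid : Prop := ∀ (unit : List Int), Dom_is_unit_valid unit → Spec_is_unit_valid unit (is_unit_valid unit)

-- ===== LEMMAS AND PROOFS =====

-- A's loop accepts iff the positive entries are pairwise distinct and disjoint from the seen set.
lemma isUnitValidGo_iff (xs : List Int) (nums : PySem.Set Int) :
    isUnitValidGo xs nums = true ↔
      ((xs.filter (fun n => decide (n > 0))).Nodup ∧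
       ∀ n ∈ xs.filter (fun n => decide (n > 0)), n ∉ nums) := by
  induction xs generalizing nums with
  | nil => simp [isUnitValidGo]
  | cons num rest ih =>
    by_cases hpos : num > 0
    · by_cases hmem : num ∈ nums
      · have hc : PySem.Set.contains nums num = true := (PySem.Set.contains_iff nums num).2 hmem
        have hL : isUnitValidGo (num :: rest) nums = false := by
          simp [isUnitValidGo, hpos, hmem]
        rw [hL]
        simp only [Bool.false_eq_true, false_iff, not_and]
        intro _ hdisj
        exact hdisj num (by simp [hpos]) hmem
      · have hL : isUnitValidGo (num :: rest) nums
            = isUnitValidGo rest (PySem.Set.add nums num) := by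
          simp [isUnitValidGo, hpos, hmem]
        have hfilt : (num :: rest).filter (fun n => decide (n > 0))
            = num :: rest.filter (fun n => decide (n > 0)) := by
          simp [hpos]
        rw [hL, ih, hfilt]
        simp only [List.nodup_cons, List.forall_mem_cons]
        constructor
        · rintro ⟨hnd, hdisj⟩
          refine ⟨⟨fun h => hdisj num h (by simp [PySem.Set.mem_add]), hnd⟩, hmem,
            fun n hn h => hdisj n hn (by rw [PySem.Set.mem_add]; exact Or.inl h)⟩
        · rintro ⟨⟨hnin, hnd⟩, _, hdisj⟩
          refine ⟨hnd, fun n hn hadd => ?_⟩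
          rw [PySem.Set.mem_add] at hadd
          rcases hadd with hadd | rfl
          · exact hdisj n hn hadd
          · exact hnin hn
    · simp [isUnitValidGo, hpos, ih]

-- adjacent-pairs scan on a ≤-sorted list detects exactly the duplicates
lemma adj_iff_nodup (s : List Int) (hs : s.Pairwise (· ≤ ·)) :
    ((s.zip s.tail).all (fun p => p.1 != p.2) = true) ↔ s.Nodup := by
  induction s with
  | nil => simp
  | cons a t ih =>
    cases t with
    | nil => simp
    | cons b u =>
      have hab : a ≤ b := (List.pairwise_cons.1 hs).1 b (by simp)
      have hbu : ∀ x ∈ u, b ≤ x := fun x hx =>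
        (List.pairwise_cons.1 (List.pairwise_cons.1 hs).2).1 x hx
      have ih' := ih (List.pairwise_cons.1 hs).2
      simp only [List.tail_cons, List.zip_cons_cons, List.all_cons, Bool.and_eq_true,
        bne_iff_ne, ne_eq] at ih' ⊢
      rw [ih']
      simp only [List.nodup_cons, List.mem_cons]
      constructor
      · rintro ⟨hne, hnd⟩
        refine ⟨fun h => ?_, hnd⟩
        rcases h with rfl | h
        · exact hne rfl
        · have := hbu a h
          omega
      · rintro ⟨hnin, hnd⟩
        exact ⟨fun h => hnin (Or.inl h), hnd⟩

-- ===== VERDICT (by name: the statement is the Claim_ definition above) =====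
theorem is_unit_valid_spec : Claim_equal_is_unit_valid := by
  intro unit _
  unfold Spec_is_unit_valid is_unit_valid is_unit_valid_alt
  set pos := unit.filter (fun n => decide (n > 0)) with hpos
  set s := PySem.List.sorted pos (fun x => x) false with hsdef
  have hperm : s.Perm pos := PySem.List.sorted_perm pos (fun x => x) false
  have hpw : s.Pairwise (· ≤ ·) := by
    simpa using PySem.List.sorted_pairwise pos (fun x => x)
  have hA : isUnitValidGo unit PySem.Set.empty = true ↔ pos.Nodup := by
    rw [isUnitValidGo_iff]
    simp [PySem.Set.empty, hpos]
  have hB : ((s.zip s.tail).all (fun p => p.1 != p.2) = true) ↔ pos.Nodup := by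
    rw [adj_iff_nodup s hpw, hperm.nodup_iff]
  rw [Bool.eq_iff_iff, hA, hB]
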